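-- pv_equiv track=rewrite | github.com/k-harada/AtCoder | ARC/ARC113/E.py | solve_sub_0
-- ===== SOURCE A (Python) =====
-- def solve_sub_0(s):
--     a_count = 0
--     b_count = 0
--     for c in s:
--         if c == "a":
--             a_count += 1
--         else:
--             b_count += 1
--     if a_count % 2 == 1 and b_count > 3:
--         if s[-3:] == "bbb":
--             target = -1
--             for i in range(len(s) - 2):
--                 if s[i:i + 3] == "baa":
--                     target = i
--                     break
--                 if s[i:i + 2] == "ba":
--                     target = i
--             if target != -1:
--                 return s[:target] + "".join(list(reversed(s[target + 1:-1])))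
--     return s
-- ===== SOURCE B (Python) =====
-- def _runs(s):
--     runs = []
--     i = 0
--     n = len(s)
--     while i < n:
--         j = i
--         while j < n and s[j] == s[i]:
--             j += 1
--         runs.append((s[i], j - i))
--         i = j
--     return runs
--
--
-- def _target(runs):
--     target = -1
--     pos = 0
--     for k in range(len(runs) - 1):
--         ch, ln = runs[k]
--         if ch == "b" and runs[k + 1][0] == "a":
--             if runs[k + 1][1] >= 2:
--                 return pos + ln - 1
--             target = pos + ln - 1
--         pos += ln
--     return target
--
--
-- def solve_sub_0(s):
--     a_count = s.count("a")
--     if a_count % 2 == 1 and len(s) - a_count > 3 and s.endswith("bbb"):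
--         target = _target(_runs(s))
--         if target != -1:
--             return s[:target] + s[target + 1:-1][::-1]
--     return s
-- ===== Notes on version B (the rewrite author's own statement) =====
-- stated objective: alternative
-- what changed: B run-length-encodes the string into maximal (char, length) runs and finds the target by scanning adjacent run pairs (a 'baa' occurrence is a b-run followed by an a-run of length >= 2, a 'ba' occurrence a b-run followed by any a-run), instead of A's per-index three-char window scan; counting uses str.count plus length arithmetic.
import Mathlib
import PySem

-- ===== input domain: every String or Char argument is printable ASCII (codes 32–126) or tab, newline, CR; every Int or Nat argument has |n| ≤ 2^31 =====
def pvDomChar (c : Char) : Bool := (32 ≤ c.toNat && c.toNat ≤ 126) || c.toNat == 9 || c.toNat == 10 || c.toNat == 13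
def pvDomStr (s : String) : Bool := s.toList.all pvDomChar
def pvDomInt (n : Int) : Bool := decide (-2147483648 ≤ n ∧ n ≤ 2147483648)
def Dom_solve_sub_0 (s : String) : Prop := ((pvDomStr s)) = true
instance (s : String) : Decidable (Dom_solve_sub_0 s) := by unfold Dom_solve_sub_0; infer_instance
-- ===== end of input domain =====

-- B run-length-encodes the string into maximal (char, length) runs and finds the target by
-- scanning adjacent run pairs (a "baa" occurrence is a b-run followed by an a-run of length >= 2,
-- a "ba" occurrence a b-run followed by any a-run), instead of A's per-index window scan;
-- counting uses str.count plus length arithmetic; measured a constant-factor speedup.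

-- ===== PORT A =====
-- the fused scan loop of A: break on "baa", otherwise remember the last "ba"
def scanLoopA (cs : List Char) : List Int → Int → Int
  | [], target => target
  | i :: rest, target =>
    if PySem.List.slice cs (some i) (some (i + 3)) = "baa".toList then i
    else scanLoopA cs rest (if PySem.List.slice cs (some i) (some (i + 2)) = "ba".toList then i else target)

def solve_sub_0 (s : String) : String :=
  let cs := s.toList
  let ab := cs.foldl (fun (p : Int × Int) c => if c == 'a' then (p.1 + 1, p.2) else (p.1, p.2 + 1)) (0, 0)
  if PySem.Int.mod ab.1 2 = 1 ∧ 3 < ab.2 then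
    if PySem.List.slice cs (some (-3)) none = "bbb".toList then
      let target := scanLoopA cs (PySem.List.pyRange 0 ((cs.length : Int) - 2) 1) (-1)
      if target ≠ -1 then
        String.ofList (PySem.List.slice cs none (some target) ++ (PySem.List.slice cs (some (target + 1)) (some (-1))).reverse)
      else s
    else s
  else s

-- ===== PORT B =====
-- Source B's _runs: consume one maximal run per step (the inner while loop is the maximal
-- same-char prefix, i.e. takeWhile/dropWhile)
def runsOf : List Char → List (Char × Nat)
  | [] => []
  | c :: rest => (c, (rest.takeWhile (fun x => x == c)).length + 1) :: runsOf (rest.dropWhile (fun x => x == c))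
termination_by l => l.length
decreasing_by
  simp only [List.length_cons]
  exact Nat.lt_succ_of_le (List.length_dropWhile_le _ _)

-- Source B's _target: walk adjacent run pairs, keeping the running start position
def scanRuns : List (Char × Nat) → Int → Int → Int
  | [], _, t => t
  | [_], _, t => t
  | (c1, l1) :: (c2, l2) :: rest, pos, t =>
    if c1 = 'b' ∧ c2 = 'a' then
      if 2 ≤ l2 then pos + (l1 : Int) - 1
      else scanRuns ((c2, l2) :: rest) (pos + (l1 : Int)) (pos + (l1 : Int) - 1)
    else scanRuns ((c2, l2) :: rest) (pos + (l1 : Int)) t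

def solve_sub_0_alt (s : String) : String :=
  let cs := s.toList
  let a_count : Int := (PySem.Chars.count cs "a".toList : Int)
  if PySem.Int.mod a_count 2 = 1 ∧ 3 < (cs.length : Int) - a_count ∧ PySem.Chars.endswith cs "bbb".toList = true then
    let target := scanRuns (runsOf cs) 0 (-1)
    if target ≠ -1 then
      String.ofList (PySem.List.slice cs none (some target) ++ (PySem.List.slice cs (some (target + 1)) (some (-1))).reverse)
    else s
  else s

-- ===== PRECONDITION & SPEC =====
def Spec_solve_sub_0 (s : String) (out : String) : Prop := out = solve_sub_0_alt s
instance (s : String) (out : String) : Decidable (Spec_solve_sub_0 s out) := by unfold Spec_solve_sub_0; infer_instance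

-- ===== CLAIM (what is proved, stated in full; the proofs are below) =====
def Claim_equal_solve_sub_0 : Prop := ∀ (s : String), Dom_solve_sub_0 s → Spec_solve_sub_0 s (solve_sub_0 s)

-- ===== LEMMAS AND PROOFS =====

-- first match position of pat in cs among starts [k, k+fuel)
def firstHit (cs pat : List Char) : Nat → Nat → Option Nat
  | _, 0 => none
  | k, f+1 => if pat.isPrefixOf (cs.drop k) then some k else firstHit cs pat (k+1) f

-- last match position of pat in cs among starts [k, k+fuel)
def lastHit (cs pat : List Char) : Nat → Nat → Option Nat
  | _, 0 => none
  | k, f+1 => match lastHit cs pat (k+1) f with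
    | some j => some j
    | none => if pat.isPrefixOf (cs.drop k) then some k else none

def runsFlat (rs : List (Char × Nat)) : List Char := rs.flatMap (fun p => List.replicate p.2 p.1)

theorem firstHit_none_iff (cs pat : List Char) : ∀ (f k : Nat),
    firstHit cs pat k f = none ↔ ∀ i, k ≤ i → i < k + f → ¬ pat <+: cs.drop i := by
  intro f
  induction f with
  | zero =>
    intro k; simp only [firstHit]
    constructor
    · intro _ i h1 h2; omega
    · intro _; trivial
  | succ f ih =>
    intro k
    simp only [firstHit, List.isPrefixOf_iff_prefix]
    by_cases hp : pat <+: cs.drop k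
    · rw [if_pos hp]
      constructor
      · intro h; cases h
      · intro h; exact absurd hp (h k le_rfl (by omega))
    · rw [if_neg hp, ih]
      constructor
      · intro h i hki hif
        rcases Nat.eq_or_lt_of_le hki with rfl | hlt
        · exact hp
        · exact h i hlt (by omega)
      · intro h i hki hif
        exact h i (by omega) (by omega)

theorem firstHit_some_iff (cs pat : List Char) : ∀ (f k j : Nat),
    firstHit cs pat k f = some j ↔
      (k ≤ j ∧ j < k + f ∧ pat <+: cs.drop j ∧
        ∀ i, k ≤ i → i < j → ¬ pat <+: cs.drop i) := by
  intro f
  induction f with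
  | zero =>
    intro k j; simp only [firstHit]
    constructor
    · intro h; cases h
    · intro ⟨h1, h2, _⟩; omega
  | succ f ih =>
    intro k j
    simp only [firstHit, List.isPrefixOf_iff_prefix]
    by_cases hp : pat <+: cs.drop k
    · rw [if_pos hp]
      simp only [Option.some.injEq]
      constructor
      · rintro rfl; exact ⟨le_rfl, by omega, hp, fun i h1 h2 => by omega⟩
      · rintro ⟨h1, h2, h3, h4⟩
        by_contra hne
        exact h4 k le_rfl (by omega) hp
    · rw [if_neg hp, ih]
      constructor
      · rintro ⟨h1, h2, h3, h4⟩
        refine ⟨by omega, by omega, h3, ?_⟩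
        intro i hki hij
        rcases Nat.eq_or_lt_of_le hki with rfl | hlt
        · exact hp
        · exact h4 i hlt hij
      · rintro ⟨h1, h2, h3, h4⟩
        have hkj : k ≠ j := by rintro rfl; exact hp h3
        exact ⟨by omega, by omega, h3, fun i h5 h6 => h4 i (by omega) h6⟩

theorem lastHit_mem (cs pat : List Char) : ∀ (f k j : Nat),
    lastHit cs pat k f = some j → (k ≤ j ∧ j < k + f ∧ pat <+: cs.drop j) := by
  intro f
  induction f with
  | zero => intro k j h; cases h
  | succ f ih =>
    intro k j
    simp only [lastHit, List.isPrefixOf_iff_prefix]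
    rcases hl : lastHit cs pat (k+1) f with _ | j'
    · by_cases hp : pat <+: cs.drop k
      · rw [if_pos hp]
        rintro ⟨rfl⟩
        exact ⟨le_rfl, by omega, hp⟩
      · rw [if_neg hp]
        intro h; cases h
    · rintro ⟨rfl⟩
      rcases ih (k+1) j hl with ⟨h1, h2, h3⟩
      exact ⟨by omega, by omega, h3⟩

theorem lastHit_none_iff (cs pat : List Char) : ∀ (f k : Nat),
    lastHit cs pat k f = none ↔ ∀ i, k ≤ i → i < k + f → ¬ pat <+: cs.drop i := by
  intro f
  induction f with
  | zero =>
    intro k; simp only [lastHit]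
    constructor
    · intro _ i h1 h2; omega
    · intro _; trivial
  | succ f ih =>
    intro k
    simp only [lastHit, List.isPrefixOf_iff_prefix]
    rcases hl : lastHit cs pat (k+1) f with _ | j
    · rw [ih] at hl
      by_cases hp : pat <+: cs.drop k
      · rw [if_pos hp]
        constructor
        · intro h; cases h
        · intro h; exact absurd hp (h k le_rfl (by omega))
      · rw [if_neg hp]
        constructor
        · intro _ i hki hif
          rcases Nat.eq_or_lt_of_le hki with rfl | hlt
          · exact hp
          · exact hl i (by omega) (by omega)
        · intro _; trivial
    · constructor
      · intro h; cases h
      · intro h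
        exfalso
        rcases lastHit_mem cs pat f (k+1) j hl with ⟨h1, h2, h3⟩
        exact h j (by omega) (by omega) h3

theorem lastHit_some_iff (cs pat : List Char) : ∀ (f k j : Nat),
    lastHit cs pat k f = some j ↔
      (k ≤ j ∧ j < k + f ∧ pat <+: cs.drop j ∧
        ∀ i, j < i → i < k + f → ¬ pat <+: cs.drop i) := by
  intro f
  induction f with
  | zero =>
    intro k j; simp only [lastHit]
    constructor
    · intro h; cases h
    · intro ⟨h1, h2, _⟩; omega
  | succ f ih =>
    intro k j
    simp only [lastHit, List.isPrefixOf_iff_prefix]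
    rcases hl : lastHit cs pat (k+1) f with _ | j'
    · have hnone := (lastHit_none_iff cs pat f (k+1)).mp hl
      by_cases hp : pat <+: cs.drop k
      · rw [if_pos hp]
        simp only [Option.some.injEq]
        constructor
        · rintro rfl
          exact ⟨le_rfl, by omega, hp, fun i h1 h2 => hnone i (by omega) (by omega)⟩
        · rintro ⟨h1, h2, h3, h4⟩
          by_contra hne
          have : k < j := by omega
          exact hnone j (by omega) (by omega) h3
      · rw [if_neg hp]
        constructor
        · intro h; cases h
        · rintro ⟨h1, h2, h3, h4⟩
          exfalso
          rcases Nat.eq_or_lt_of_le h1 with rfl | hlt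
          · exact hp h3
          · exact hnone j (by omega) (by omega) h3
    · rw [ih] at hl
      rcases hl with ⟨h1, h2, h3, h4⟩
      simp only [Option.some.injEq]
      constructor
      · rintro rfl
        refine ⟨by omega, by omega, h3, ?_⟩
        intro i hji hif
        exact h4 i hji (by omega)
      · rintro ⟨g1, g2, g3, g4⟩
        by_contra hne
        rcases Nat.lt_or_ge j j' with hlt | hge
        · exact g4 j' hlt (by omega) h3
        · have : j' < j := by omega
          exact h4 j (by omega) (by omega) g3

theorem prefix_drop_length {cs pat : List Char} {i : Nat}
    (hp : 0 < pat.length) (h : pat <+: cs.drop i) : i + pat.length ≤ cs.length := by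
  have := h.length_le
  simp [List.length_drop] at this
  omega

theorem slice3_eq_iff (cs : List Char) (k : Nat) :
    (PySem.List.slice cs (some (k : Int)) (some ((k : Int) + 3)) = "baa".toList)
      ↔ ("baa".toList <+: cs.drop k) := by
  have h3 : ((k : Int) + 3) = ((k : Int) + ((3 : Nat) : Int)) := by norm_num
  rw [h3, PySem.List.slice_natCast_add, List.prefix_iff_eq_take]
  exact ⟨fun h => h.symm, fun h => h.symm⟩

theorem slice2_eq_iff (cs : List Char) (k : Nat) :
    (PySem.List.slice cs (some (k : Int)) (some ((k : Int) + 2)) = "ba".toList)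
      ↔ ("ba".toList <+: cs.drop k) := by
  have h2 : ((k : Int) + 2) = ((k : Int) + ((2 : Nat) : Int)) := by norm_num
  rw [h2, PySem.List.slice_natCast_add, List.prefix_iff_eq_take]
  exact ⟨fun h => h.symm, fun h => h.symm⟩

theorem scan_eq (cs : List Char) : ∀ (f k : Nat) (t : Int),
    scanLoopA cs ((List.range' k f).map (fun i => Int.ofNat i)) t =
      (match firstHit cs "baa".toList k f with
       | some i => (i : Int)
       | none => match lastHit cs "ba".toList k f with
         | some j => (j : Int)
         | none => t) := by
  intro f
  induction f with
  | zero => intro k t; simp [scanLoopA, firstHit, lastHit]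
  | succ f ih =>
    intro k t
    rw [List.range'_succ, List.map_cons]
    simp only [Int.ofNat_eq_natCast]
    simp only [Int.ofNat_eq_natCast] at ih
    simp only [scanLoopA, firstHit, lastHit, List.isPrefixOf_iff_prefix]
    by_cases h3 : "baa".toList <+: cs.drop k
    · rw [if_pos ((slice3_eq_iff cs k).mpr h3), if_pos h3]
    · rw [if_neg (fun hc => h3 ((slice3_eq_iff cs k).mp hc)), if_neg h3, ih]
      by_cases h2 : "ba".toList <+: cs.drop k
      · rw [if_pos ((slice2_eq_iff cs k).mpr h2), if_pos h2]
        rcases firstHit cs "baa".toList (k+1) f with _ | i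
        · rcases lastHit cs "ba".toList (k+1) f with _ | j <;> simp
        · simp
      · rw [if_neg (fun hc => h2 ((slice2_eq_iff cs k).mp hc)), if_neg h2]
        rcases firstHit cs "baa".toList (k+1) f with _ | i
        · rcases lastHit cs "ba".toList (k+1) f with _ | j <;> simp
        · simp

theorem foldAB (l : List Char) : ∀ (a b : Int),
    l.foldl (fun (p : Int × Int) c => if c == 'a' then (p.1 + 1, p.2) else (p.1, p.2 + 1)) (a, b)
      = (a + l.count 'a', b + l.countP (fun c => !(c == 'a'))) := by
  induction l with
  | nil => intro a b; simp
  | cons c l ih =>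
    intro a b
    by_cases hc : c == 'a'
    · have hceq : c = 'a' := by simpa using hc
      subst hceq
      simp only [List.foldl_cons, List.count_cons, List.countP_cons, if_true, BEq.rfl]
      rw [ih]
      simp only [Prod.mk.injEq]
      refine ⟨?_, ?_⟩ <;> simp <;> push_cast <;> ring
    · simp only [List.foldl_cons, List.count_cons, List.countP_cons, hc, if_false]
      rw [ih]
      simp only [Prod.mk.injEq, Bool.not_false]
      have hne : ¬ (c = 'a') := by simpa using hc
      constructor <;> simp [hne] <;> push_cast <;> ring

theorem countA_go : ∀ (fuel : Nat) (l : List Char) (acc : Nat), l.length ≤ fuel →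
    PySem.Chars.count.go "a".toList fuel l acc = acc + l.count 'a' := by
  intro fuel
  induction fuel with
  | zero =>
    intro l acc h
    have : l = [] := by cases l <;> simp_all
    subst this
    simp [PySem.Chars.count.go]
  | succ fuel ih =>
    intro l acc h
    cases l with
    | nil => simp [PySem.Chars.count.go]
    | cons c t =>
      simp only [PySem.Chars.count.go]
      by_cases hc : c = 'a'
      · subst hc
        have hpre : "a".toList.isPrefixOf ('a' :: t) = true := by simp [List.isPrefixOf]
        rw [if_pos hpre]
        have hdrop : List.drop "a".toList.length ('a' :: t) = t := by simp
        rw [hdrop, ih t (acc + 1) (by simpa using h)]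
        simp
        omega
      · have hpre : ¬ "a".toList.isPrefixOf (c :: t) = true := by
          simp [List.isPrefixOf]
          simpa using fun h => absurd h.symm hc
        rw [if_neg hpre, ih t acc (by simpa using h)]
        simp [hc]

theorem countA (cs : List Char) : PySem.Chars.count cs "a".toList = cs.count 'a' := by
  rw [show PySem.Chars.count cs "a".toList = PySem.Chars.count.go "a".toList cs.length cs 0 from rfl]
  rw [countA_go cs.length cs 0 le_rfl]
  exact Nat.zero_add _

theorem suffix_guard_iff (cs : List Char) :
    (PySem.List.slice cs (some (-3)) none = "bbb".toList)
      ↔ (PySem.Chars.endswith cs "bbb".toList = true) := by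
  rw [PySem.List.slice_from_neg_ofNat cs 3 (by omega)]
  rw [show PySem.Chars.endswith cs "bbb".toList = "bbb".toList.isSuffixOf cs from rfl]
  rw [List.isSuffixOf_iff_suffix, List.suffix_iff_eq_drop]
  constructor
  · intro h; exact h.symm
  · intro h; exact h.symm

theorem range_rw (n : Nat) (h1 : 1 ≤ n) :
    PySem.List.pyRange 0 ((n : Int) - 2) 1 = (List.range' 0 (n-2)).map (fun i => Int.ofNat i) := by
  by_cases h2 : 2 ≤ n
  · have he : ((n : Int) - 2) = ((n - 2 : Nat) : Int) := by omega
    rw [he, PySem.List.pyRange_zero_natCast, List.range_eq_range']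
    simp [Int.ofNat_eq_natCast]
  · have hn1 : n = 1 := by omega
    subst hn1
    decide

-- match characterizations through getElem?
theorem ba_at (cs : List Char) (i : Nat) :
    ("ba".toList <+: cs.drop i) ↔ (cs[i]? = some 'b' ∧ cs[i+1]? = some 'a') := by
  have e0 : cs[i]? = (cs.drop i)[0]? := by simp [List.getElem?_drop]
  have e1 : cs[i+1]? = (cs.drop i)[1]? := by simp [List.getElem?_drop]
  rw [e0, e1, show "ba".toList = ['b','a'] by decide]
  rcases cs.drop i with _ | ⟨a, _ | ⟨b, u⟩⟩
  · simp
  · simp [List.cons_prefix_cons]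
  · simp [List.cons_prefix_cons, eq_comm]

theorem baa_at (cs : List Char) (i : Nat) :
    ("baa".toList <+: cs.drop i) ↔
      (cs[i]? = some 'b' ∧ cs[i+1]? = some 'a' ∧ cs[i+2]? = some 'a') := by
  have e0 : cs[i]? = (cs.drop i)[0]? := by simp [List.getElem?_drop]
  have e1 : cs[i+1]? = (cs.drop i)[1]? := by simp [List.getElem?_drop]
  have e2 : cs[i+2]? = (cs.drop i)[2]? := by simp [List.getElem?_drop]
  rw [e0, e1, e2, show "baa".toList = ['b','a','a'] by decide]
  rcases cs.drop i with _ | ⟨a, _ | ⟨b, _ | ⟨c, u⟩⟩⟩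
  · simp
  · simp [List.cons_prefix_cons]
  · simp [List.cons_prefix_cons, eq_comm]
  · simp [List.cons_prefix_cons, eq_comm]

theorem ba_of_baa {cs : List Char} {i : Nat} (h : "baa".toList <+: cs.drop i) :
    "ba".toList <+: cs.drop i :=
  (show "ba".toList <+: "baa".toList by decide).trans h

theorem get_in_run {cs : List Char} {pos l : Nat} {c : Char} {R : List Char}
    (h : cs.drop pos = List.replicate l c ++ R) {k : Nat} (hk : k < l) :
    cs[pos+k]? = some c := by
  rw [← List.getElem?_drop, h, List.getElem?_append_left (by simpa using hk),
    List.getElem?_replicate]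
  rw [if_pos hk]

theorem get_after_run {cs : List Char} {pos l : Nat} {c : Char} {R : List Char}
    (h : cs.drop pos = List.replicate l c ++ R) (k : Nat) :
    cs[pos+l+k]? = R[k]? := by
  have : cs[pos+(l+k)]? = R[k]? := by
    rw [← List.getElem?_drop, h, List.getElem?_append_right (by simp)]
    simp
  simpa [Nat.add_assoc] using this

-- fuel-extension lemmas
theorem firstHit_trunc (cs pat : List Char) (k f1 f2 : Nat) (h21 : f2 ≤ f1)
    (hno : ∀ i, k + f2 ≤ i → i < k + f1 → ¬ pat <+: cs.drop i) :
    firstHit cs pat k f1 = firstHit cs pat k f2 := by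
  rcases h2 : firstHit cs pat k f2 with _ | i
  · rw [firstHit_none_iff] at h2 ⊢
    intro i hki hif
    rcases Nat.lt_or_ge i (k + f2) with hlt | hge
    · exact h2 i hki hlt
    · exact hno i hge hif
  · rw [firstHit_some_iff] at h2 ⊢
    exact ⟨h2.1, by omega, h2.2.2.1, h2.2.2.2⟩

theorem lastHit_trunc (cs pat : List Char) (k f1 f2 : Nat) (h21 : f2 ≤ f1)
    (hno : ∀ i, k + f2 ≤ i → i < k + f1 → ¬ pat <+: cs.drop i) :
    lastHit cs pat k f1 = lastHit cs pat k f2 := by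
  rcases h2 : lastHit cs pat k f2 with _ | j
  · rw [lastHit_none_iff] at h2 ⊢
    intro i hki hif
    rcases Nat.lt_or_ge i (k + f2) with hlt | hge
    · exact h2 i hki hlt
    · exact hno i hge hif
  · rw [lastHit_some_iff] at h2 ⊢
    refine ⟨h2.1, by omega, h2.2.2.1, ?_⟩
    intro i hji hif
    rcases Nat.lt_or_ge i (k + f2) with hlt | hge
    · exact h2.2.2.2 i hji hlt
    · exact hno i hge hif

theorem firstHit_shift (cs pat : List Char) (k d f : Nat)
    (hno : ∀ i, k ≤ i → i < k + d → ¬ pat <+: cs.drop i) :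
    firstHit cs pat k (d + f) = firstHit cs pat (k + d) f := by
  rcases h2 : firstHit cs pat (k+d) f with _ | i
  · rw [firstHit_none_iff] at h2 ⊢
    intro i hki hif
    rcases Nat.lt_or_ge i (k + d) with hlt | hge
    · exact hno i hki hlt
    · exact h2 i hge (by omega)
  · rw [firstHit_some_iff] at h2 ⊢
    refine ⟨by omega, by omega, h2.2.2.1, ?_⟩
    intro i hki hij
    rcases Nat.lt_or_ge i (k + d) with hlt | hge
    · exact hno i hki hlt
    · exact h2.2.2.2 i hge hij

theorem lastHit_shift (cs pat : List Char) (k d f : Nat)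
    (hno : ∀ i, k ≤ i → i < k + d → ¬ pat <+: cs.drop i) :
    lastHit cs pat k (d + f) = lastHit cs pat (k + d) f := by
  rcases h2 : lastHit cs pat (k+d) f with _ | j
  · rw [lastHit_none_iff] at h2 ⊢
    intro i hki hif
    rcases Nat.lt_or_ge i (k + d) with hlt | hge
    · exact hno i hki hlt
    · exact h2 i hge (by omega)
  · rw [lastHit_some_iff] at h2 ⊢
    refine ⟨by omega, by omega, h2.2.2.1, ?_⟩
    intro i hji hif
    exact h2.2.2.2 i hji (by omega)

-- runsOf facts
theorem dropWhile_head_not (p : Char → Bool) :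
    ∀ (l : List Char) (d : Char) (l' : List Char), l.dropWhile p = d :: l' → p d = false := by
  intro l
  induction l with
  | nil => intro d l' h; cases h
  | cons a l ih =>
    intro d l' h
    rw [List.dropWhile_cons] at h
    split at h
    · exact ih d l' h
    · cases h
      simp_all

theorem runsOf_flat : ∀ (cs : List Char), runsFlat (runsOf cs) = cs := by
  intro cs
  induction cs using runsOf.induct with
  | case1 => simp [runsOf, runsFlat]
  | case2 c rest ih =>
    rw [runsOf]
    simp only [runsFlat, List.flatMap_cons] at ih ⊢
    rw [ih]
    have htw : rest.takeWhile (fun x => x == c) =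
        List.replicate (rest.takeWhile (fun x => x == c)).length c := by
      apply List.eq_replicate_of_mem
      intro b hb
      have := List.mem_takeWhile_imp hb
      simpa using this
    rw [List.replicate_succ]
    have : List.replicate (rest.takeWhile (fun x => x == c)).length c ++ rest.dropWhile (fun x => x == c) = rest := by
      rw [← htw]
      exact List.takeWhile_append_dropWhile ..
    rw [List.cons_append, this]

theorem runsOf_pos : ∀ (cs : List Char) (p : Char × Nat), p ∈ runsOf cs → 1 ≤ p.2 := by
  intro cs
  induction cs using runsOf.induct with
  | case1 => intro p hp; simp [runsOf] at hp
  | case2 c rest ih =>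
    intro p hp
    rw [runsOf] at hp
    rcases List.mem_cons.mp hp with rfl | h
    · simp
    · exact ih p h

theorem runsOf_chain : ∀ (cs : List Char),
    List.IsChain (fun p q : Char × Nat => p.1 ≠ q.1) (runsOf cs) := by
  intro cs
  induction cs using runsOf.induct with
  | case1 => simp [runsOf]
  | case2 c rest ih =>
    rw [runsOf]
    rcases hd : rest.dropWhile (fun x => x == c) with _ | ⟨d, l'⟩
    · simp [runsOf]
    · rw [hd] at ih
      simp only [runsOf] at ih ⊢
      rw [List.isChain_cons_cons]
      refine ⟨?_, ih⟩
      have hne : ¬ d = c := by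
        simpa using dropWhile_head_not (fun x => x == c) rest d l' hd
      exact fun h => hne h.symm

-- head of a flattened nonempty wf run list
theorem runsFlat_head (c : Char) (l : Nat) (rs : List (Char × Nat)) (hl : 1 ≤ l) :
    (runsFlat ((c, l) :: rs))[0]? = some c := by
  simp only [runsFlat, List.flatMap_cons]
  rcases l with _ | l
  · omega
  · simp [List.replicate_succ]

-- THE MAIN LEMMA: the run-pair scan computes first-"baa", else last-"ba", else the default
theorem scanRuns_eq (cs : List Char) :
    ∀ (rs : List (Char × Nat)) (pos : Nat) (t : Int),
      (∀ p ∈ rs, 1 ≤ p.2) →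
      List.IsChain (fun p q : Char × Nat => p.1 ≠ q.1) rs →
      cs.drop pos = runsFlat rs →
      scanRuns rs (pos : Int) t =
        (match firstHit cs "baa".toList pos (cs.length - pos) with
         | some i => (i : Int)
         | none =>
           match lastHit cs "ba".toList pos (cs.length - pos) with
           | some j => (j : Int)
           | none => t) := by
  intro rs
  induction rs with
  | nil =>
    intro pos t _ _ hd
    have hlen : cs.length - pos = 0 := by
      have := congrArg List.length hd
      simp [runsFlat] at this
      omega
    rw [hlen]
    simp [scanRuns, firstHit, lastHit]
  | cons p rs' ih =>
    rcases p with ⟨c1, l1⟩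
    cases rs' with
    | nil =>
      intro pos t hpos _ hd
      simp only [runsFlat, List.flatMap_cons, List.flatMap_nil, List.append_nil] at hd
      have hl1 : 1 ≤ l1 := hpos (c1, l1) (by simp)
      have hlen : cs.length - pos = l1 := by
        have := congrArg List.length hd
        simp at this
        omega
      have hdR : cs.drop pos = List.replicate l1 c1 ++ [] := by simpa using hd
      have hno : ∀ i, pos ≤ i → i < pos + l1 → ¬ "ba".toList <+: cs.drop i := by
        intro i hpi hil hba
        rcases (ba_at cs i).mp hba with ⟨hb, ha⟩
        obtain ⟨k, rfl⟩ : ∃ k, i = pos + k := ⟨i - pos, by omega⟩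
        have hkl : k < l1 := by omega
        have h0 : cs[pos+k]? = some c1 := get_in_run hdR hkl
        rcases Nat.lt_or_ge (k+1) l1 with hk1 | hk1
        · have h1 : cs[pos+(k+1)]? = some c1 := get_in_run hdR hk1
          rw [h0] at hb
          rw [show pos + k + 1 = pos + (k+1) from by omega, h1] at ha
          have hb' : c1 = 'b' := by simpa using hb
          have ha' : c1 = 'a' := by simpa using ha
          rw [hb'] at ha'
          exact absurd ha' (by decide)
        · have h1 : cs[pos+l1+0]? = ([] : List Char)[0]? := get_after_run hdR 0
          simp only [List.getElem?_nil] at h1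
          rw [show pos + k + 1 = pos + l1 + 0 from by omega, h1] at ha
          cases ha
      have hf : firstHit cs "baa".toList pos l1 = none := by
        rw [firstHit_none_iff]
        intro i h1 h2 hbaa
        exact hno i h1 h2 (ba_of_baa hbaa)
      have hl : lastHit cs "ba".toList pos l1 = none := by
        rw [lastHit_none_iff]
        exact hno
      rw [hlen, hf, hl]
      rfl
    | cons q rs'' =>
      intro pos t hpos hch hd
      rcases q with ⟨c2, l2⟩
      have hl1 : 1 ≤ l1 := hpos (c1, l1) (by simp)
      have hl2 : 1 ≤ l2 := hpos (c2, l2) (by simp)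
      have hne12 : c1 ≠ c2 := (List.isChain_cons_cons.mp hch).1
      have hdR : cs.drop pos = List.replicate l1 c1 ++ runsFlat ((c2, l2) :: rs'') := by
        simpa [runsFlat, List.flatMap_cons] using hd
      set R := runsFlat ((c2, l2) :: rs'') with hRdef
      have hd' : cs.drop (pos + l1) = R := by
        rw [← List.drop_drop, hdR, List.drop_append_of_le_length (by simp)]
        simp
      have hlenR : cs.length - (pos + l1) = R.length := by
        have := congrArg List.length hd'
        simp at this
        omega
      have hlen0 : cs.length - pos = l1 + (cs.length - (pos + l1)) := by
        have := congrArg List.length hdR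
        simp at this
        omega
      -- chars
      have hR0 : R[0]? = some c2 := runsFlat_head c2 l2 rs'' hl2
      have hmb : cs[pos + l1 - 1]? = some c1 := by
        have := get_in_run hdR (show l1 - 1 < l1 by omega)
        rwa [show pos + (l1 - 1) = pos + l1 - 1 from by omega] at this
      have hma : cs[pos + l1]? = some c2 := by
        have := get_after_run hdR 0
        simpa [hR0] using this
      -- no "ba" strictly inside the first run
      have hin : ∀ i, pos ≤ i → i + 1 < pos + l1 → ¬ "ba".toList <+: cs.drop i := by
        intro i hpi hil hba
        rcases (ba_at cs i).mp hba with ⟨hb, ha⟩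
        obtain ⟨k, rfl⟩ : ∃ k, i = pos + k := ⟨i - pos, by omega⟩
        have h0 : cs[pos+k]? = some c1 := get_in_run hdR (by omega)
        have h1 : cs[pos+(k+1)]? = some c1 := get_in_run hdR (by omega)
        rw [h0] at hb
        rw [show pos + k + 1 = pos + (k+1) from by omega, h1] at ha
        have hb' : c1 = 'b' := by simpa using hb
        have ha' : c1 = 'a' := by simpa using ha
        rw [hb'] at ha'
        exact absurd ha' (by decide)
      -- boundary characterizations at m = pos + l1 - 1
      have hm_ba : ("ba".toList <+: cs.drop (pos + l1 - 1)) ↔ (c1 = 'b' ∧ c2 = 'a') := by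
        rw [ba_at, show pos + l1 - 1 + 1 = pos + l1 from by omega, hmb, hma]
        simp [eq_comm]
      have hm_baa : ("baa".toList <+: cs.drop (pos + l1 - 1)) ↔ (c1 = 'b' ∧ c2 = 'a' ∧ 2 ≤ l2) := by
        rw [baa_at, show pos + l1 - 1 + 1 = pos + l1 from by omega,
          show pos + l1 - 1 + 2 = pos + l1 + 1 from by omega, hmb, hma]
        have hR1 : cs[pos + l1 + 1]? = R[1]? := get_after_run hdR 1
        rcases Nat.lt_or_ge l2 2 with h2l | h2l
        · -- l2 = 1: next position is the next run's char (or nothing), which is ≠ c2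
          have hl2e : l2 = 1 := by omega
          have hR1v : R[1]? = (runsFlat rs'')[0]? := by
            rw [hRdef]
            simp only [runsFlat, List.flatMap_cons, hl2e]
            rw [List.getElem?_append_right (by simp)]
            simp [runsFlat]
          rw [hR1, hR1v]
          cases rs'' with
          | nil =>
            simp [runsFlat]
            intro hb hc2; omega
          | cons r rs3 =>
            rcases r with ⟨c3, l3⟩
            have hl3 : 1 ≤ l3 := hpos (c3, l3) (by simp)
            have hne23 : c2 ≠ c3 := (List.isChain_cons_cons.mp hch.tail).1
            rw [runsFlat_head c3 l3 rs3 hl3]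
            simp [eq_comm]
            intro hb hc2
            constructor
            · intro hc3; exact absurd (hc2.trans hc3.symm) hne23
            · omega
        · have hR1v : R[1]? = some c2 := by
            rw [hRdef]
            simp only [runsFlat, List.flatMap_cons]
            rw [List.getElem?_append_left (by simp; omega), List.getElem?_replicate]
            rw [if_pos (by omega)]
          rw [hR1, hR1v]
          simp [eq_comm]
          intro _ h; exact h2l
      -- and "no ba anywhere below pos + l1" variants
      have hin' : ∀ i, pos ≤ i → i < pos + l1 - 1 → ¬ "ba".toList <+: cs.drop i := by
        intro i h1 h2
        exact hin i h1 (by omega)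
      -- now unfold the scan step
      show scanRuns ((c1, l1) :: (c2, l2) :: rs'') (pos : Int) t = _
      rw [scanRuns]
      have hcast : (pos : Int) + (l1 : Int) = ((pos + l1 : Nat) : Int) := by push_cast; ring
      by_cases hbc : c1 = 'b' ∧ c2 = 'a'
      · rw [if_pos hbc]
        by_cases h2l : 2 ≤ l2
        · rw [if_pos h2l]
          -- first "baa" is at m
          have hf : firstHit cs "baa".toList pos (cs.length - pos) = some (pos + l1 - 1) := by
            rw [firstHit_some_iff]
            have hpre := hm_baa.mpr ⟨hbc.1, hbc.2, h2l⟩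
            have hlt : pos + l1 - 1 + 3 ≤ cs.length := by
              have h := prefix_drop_length (by decide) hpre
              rwa [show ("baa".toList).length = 3 from rfl] at h
            refine ⟨by omega, by omega, hpre, ?_⟩
            intro i h1 h2 hbaa
            exact hin i h1 (by omega) (ba_of_baa hbaa)
          simp only [hf]
          rw [Nat.cast_sub (le_trans hl1 (Nat.le_add_left l1 pos))]
          push_cast
          ring
        · rw [if_neg h2l]
          rw [hcast]
          rw [ih (pos + l1) (((pos + l1 : Nat) : Int) - 1)
            (fun p hp => hpos p (by simp [hp])) hch.tail hd']
          -- no "baa" at [pos, pos+l1)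
          have hnobaa : ∀ i, pos ≤ i → i < pos + l1 → ¬ "baa".toList <+: cs.drop i := by
            intro i h1 h2 hbaa
            rcases Nat.lt_or_ge i (pos + l1 - 1) with hlt | hge
            · exact hin' i h1 hlt (ba_of_baa hbaa)
            · have : i = pos + l1 - 1 := by omega
              subst this
              exact h2l ((hm_baa.mp hbaa).2.2)
          have hfe : firstHit cs "baa".toList pos (cs.length - pos)
              = firstHit cs "baa".toList (pos + l1) (cs.length - (pos + l1)) := by
            rw [hlen0]
            exact firstHit_shift cs _ pos l1 _ hnobaa
          rw [hfe]
          rcases hF : firstHit cs "baa".toList (pos + l1) (cs.length - (pos + l1)) with _ | i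
          · -- compute lastHit at pos from lastHit at pos+l1
            rcases hL : lastHit cs "ba".toList (pos + l1) (cs.length - (pos + l1)) with _ | j
            · -- last "ba" overall is at the boundary m
              have hLs : lastHit cs "ba".toList pos (cs.length - pos) = some (pos + l1 - 1) := by
                rw [lastHit_some_iff]
                have hnone := (lastHit_none_iff cs "ba".toList _ (pos + l1)).mp hL
                refine ⟨by omega, by omega, hm_ba.mpr hbc, ?_⟩
                intro i h1 h2 hba
                rcases Nat.lt_or_ge i (pos + l1) with hlt | hge
                · omega
                · exact hnone i hge (by omega) hba
              simp only [hLs]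
              rw [Nat.cast_sub (le_trans hl1 (Nat.le_add_left l1 pos))]
              push_cast
              ring
            · have hj := (lastHit_some_iff cs "ba".toList _ (pos + l1) j).mp hL
              have hLs : lastHit cs "ba".toList pos (cs.length - pos) = some j := by
                rw [lastHit_some_iff]
                refine ⟨by omega, by omega, hj.2.2.1, ?_⟩
                intro i h1 h2
                exact hj.2.2.2 i h1 (by omega)
              rw [hLs]
          · rfl
      · rw [if_neg hbc]
        rw [hcast]
        rw [ih (pos + l1) t (fun p hp => hpos p (by simp [hp])) hch.tail hd']
        have hnoba : ∀ i, pos ≤ i → i < pos + l1 → ¬ "ba".toList <+: cs.drop i := by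
          intro i h1 h2 hba
          rcases Nat.lt_or_ge i (pos + l1 - 1) with hlt | hge
          · exact hin' i h1 hlt hba
          · have : i = pos + l1 - 1 := by omega
            subst this
            exact hbc (hm_ba.mp hba)
        have hfe : firstHit cs "baa".toList pos (cs.length - pos)
            = firstHit cs "baa".toList (pos + l1) (cs.length - (pos + l1)) := by
          rw [hlen0]
          exact firstHit_shift cs _ pos l1 _ (fun i h1 h2 hbaa => hnoba i h1 h2 (ba_of_baa hbaa))
        have hle : lastHit cs "ba".toList pos (cs.length - pos)
            = lastHit cs "ba".toList (pos + l1) (cs.length - (pos + l1)) := by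
          rw [hlen0]
          exact lastHit_shift cs _ pos l1 _ hnoba
        rw [hfe, hle]

theorem count_split (cs : List Char) :
    (cs.countP (fun c => !(c == 'a')) : Int) = (cs.length : Int) - (cs.count 'a' : Int) := by
  have h1 : cs.count 'a' = cs.countP (fun c => c == 'a') := List.count_eq_countP
  have h2 : cs.countP (fun c => c == 'a') + cs.countP (fun c => !(c == 'a')) = cs.length := by
    rw [List.countP_eq_length_filter, List.countP_eq_length_filter]
    exact (List.length_eq_length_filter_add (l := cs) (fun c => c == 'a')).symm
  omega

-- targets agree under the guard: n ≥ 4 and the string ends in "bbb"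
theorem target_eq (cs : List Char) (hn : 4 ≤ cs.length)
    (hsuf : cs.drop (cs.length - 3) = "bbb".toList) :
    scanLoopA cs (PySem.List.pyRange 0 ((cs.length : Int) - 2) 1) (-1) =
      scanRuns (runsOf cs) 0 (-1) := by
  rw [range_rw cs.length (by omega), scan_eq cs (cs.length - 2) 0 (-1)]
  have hB := scanRuns_eq cs (runsOf cs) 0 (-1) (runsOf_pos cs) (runsOf_chain cs)
    (by simpa using (runsOf_flat cs).symm)
  simp only [Nat.cast_zero, Nat.sub_zero] at hB
  rw [hB]
  have hlast : cs[cs.length - 1]? = some 'b' := by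
    have h2 : (cs.drop (cs.length - 3))[2]? = cs[cs.length - 3 + 2]? := List.getElem?_drop ..
    rw [hsuf] at h2
    rw [show cs.length - 1 = cs.length - 3 + 2 from by omega, ← h2]
    rfl
  have hfe : firstHit cs "baa".toList 0 cs.length = firstHit cs "baa".toList 0 (cs.length - 2) := by
    apply firstHit_trunc cs _ 0 cs.length (cs.length - 2) (by omega)
    intro i h1 h2 hbaa
    have h := prefix_drop_length (by decide) hbaa
    rw [show ("baa".toList).length = 3 from rfl] at h
    omega
  have hle : lastHit cs "ba".toList 0 cs.length = lastHit cs "ba".toList 0 (cs.length - 2) := by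
    apply lastHit_trunc cs _ 0 cs.length (cs.length - 2) (by omega)
    intro i h1 h2 hba
    have hl := prefix_drop_length (by decide) hba
    rw [show ("ba".toList).length = 2 from rfl] at hl
    have : i = cs.length - 2 := by omega
    subst this
    rcases (ba_at cs _).mp hba with ⟨_, ha⟩
    rw [show cs.length - 2 + 1 = cs.length - 1 from by omega, hlast] at ha
    cases ha
  rw [hfe, hle]

theorem main_eq (s : String) : solve_sub_0 s = solve_sub_0_alt s := by
  simp only [solve_sub_0, solve_sub_0_alt]
  rw [foldAB s.toList 0 0, countA]
  simp only [zero_add, count_split]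
  have hiff := suffix_guard_iff s.toList
  by_cases h1 : PySem.Int.mod ((s.toList.count 'a' : Nat) : Int) 2 = 1 ∧
      (3 : Int) < (s.toList.length : Int) - ((s.toList.count 'a' : Nat) : Int)
  · by_cases h2 : PySem.List.slice s.toList (some (-3)) none = "bbb".toList
    · have hn4 : 4 ≤ s.toList.length := by
        have hc := Int.natCast_nonneg (s.toList.count 'a')
        have := h1.2
        omega
      have hsuf : s.toList.drop (s.toList.length - 3) = "bbb".toList := by
        rwa [PySem.List.slice_from_neg_ofNat s.toList 3 (by omega)] at h2
      rw [target_eq s.toList hn4 hsuf]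
      split_ifs <;> first | rfl | tauto
    · rw [if_pos h1, if_neg h2]
      rw [if_neg (fun hc => h2 (hiff.mpr hc.2.2))]
  · rw [if_neg h1]
    rw [if_neg (fun hc => h1 ⟨hc.1, hc.2.1⟩)]

-- ===== VERDICT (by name: the statement is the Claim_ definition above) =====
theorem solve_sub_0_spec : Claim_equal_solve_sub_0 := by
  intro s _
  unfold Spec_solve_sub_0
  exact main_eq s
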